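-- pv_equiv track=rewrite | github.com/fspirit/cracking-coding-interview | hard/ex-18-4.py | countTwos
-- ===== SOURCE A (Python) =====
-- def countTwos(n):
-- 	count = 0
-- 	for m in range(0, n + 1):
-- 		k = m
-- 		while (k > 0):
-- 			if k % 10 == 2:
-- 				count += 1
-- 			k = int(k / 10)
-- 	return count
-- ===== SOURCE B (Python) =====
-- def countTwos(n):
--     # Per-position digit counting: O(log n) instead of enumerating 0..n.
--     if n < 0:
--         return 0
--     count = 0
--     p = 1
--     while p <= n:
--         higher = n // (p * 10)
--         cur = (n // p) % 10
--         lower = n % p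
--         if cur < 2:
--             count += higher * p
--         elif cur == 2:
--             count += higher * p + lower + 1
--         else:
--             count += (higher + 1) * p
--         p *= 10
--     return count
-- ===== Notes on version B (the rewrite author's own statement) =====
-- stated objective: faster
-- what changed: A enumerates every number from zero to n and scans its digits; B counts occurrences of the target digit at each decimal position directly with the standard higher/current/lower per-position formula, one loop iteration per digit position.
import Mathlib
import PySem

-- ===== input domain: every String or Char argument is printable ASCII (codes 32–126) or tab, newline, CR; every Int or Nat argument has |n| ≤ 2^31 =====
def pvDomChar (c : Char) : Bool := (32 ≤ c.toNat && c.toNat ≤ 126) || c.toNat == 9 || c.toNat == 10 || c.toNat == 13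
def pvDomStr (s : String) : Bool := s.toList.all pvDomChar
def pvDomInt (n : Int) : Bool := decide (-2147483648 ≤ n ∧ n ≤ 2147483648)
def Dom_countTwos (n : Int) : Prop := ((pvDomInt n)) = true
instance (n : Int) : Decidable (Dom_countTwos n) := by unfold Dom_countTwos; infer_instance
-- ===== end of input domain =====

-- B replaces A's enumeration of every number in 0..n with the per-decimal-position
-- counting formula (objective: faster).

-- ===== PORT A =====
-- inner `while k > 0` loop of A; `int(k / 10)` truncates toward zero = Int.tdiv
-- (exact on the domain: for 0 < k ≤ 2^31 float truncation agrees with integer truncation)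
def countTwosInner (k count : Int) : Int :=
  if h : 0 < k then
    countTwosInner (Int.tdiv k 10) (if Int.emod k 10 = 2 then count + 1 else count)
  else count
termination_by k.toNat
decreasing_by
  have h10 : Int.tdiv k 10 = k / 10 := Int.tdiv_eq_ediv_of_nonneg (by omega)
  rw [h10]; omega

def countTwos (n : Int) : Int :=
  (PySem.List.pyRange 0 (n + 1) 1).foldl (fun count m => countTwosInner m count) 0

-- ===== PORT B =====
-- `while p <= n` loop of B; all values are nonnegative Python ints, carried as Nat
-- (Python // and % on nonnegative ints coincide with Nat division/mod).
-- The `p = 0` branch is only a totality guard: p starts at 1 and is only multiplied by 10.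
def countTwosAltGo (n p count : Nat) : Nat :=
  if p = 0 then count
  else if p ≤ n then
    let higher := n / (p * 10)
    let cur := (n / p) % 10
    let lower := n % p
    countTwosAltGo n (p * 10)
      (if cur < 2 then count + higher * p
       else if cur = 2 then count + (higher * p + lower + 1)
       else count + (higher + 1) * p)
  else count
termination_by n + 1 - p

def countTwos_alt (n : Int) : Int :=
  if n < 0 then 0
  else Int.ofNat (countTwosAltGo n.toNat 1 0)

-- ===== PRECONDITION & SPEC =====
def Spec_countTwos (n : Int) (out : Int) : Prop := out = countTwos_alt n
instance (n : Int) (out : Int) : Decidable (Spec_countTwos n out) := by unfold Spec_countTwos; infer_instance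

-- ===== CLAIM (what is proved, stated in full; the proofs are below) =====
def Claim_equal_countTwos : Prop := ∀ (n : Int), Dom_countTwos n → Spec_countTwos n (countTwos n)

-- ===== LEMMAS AND PROOFS =====

-- number of digits 2 in the decimal expansion of k
def c2 (k : Nat) : Nat :=
  if k = 0 then 0
  else (if k % 10 = 2 then 1 else 0) + c2 (k / 10)
termination_by k
decreasing_by omega

-- the common mathematical value: total count of digit 2 among 0,…,N-1
def sumC2 (N : Nat) : Nat := ∑ m ∈ Finset.range N, c2 m

lemma countTwosInner_eq (k : Nat) (c : Int) :
    countTwosInner (k : Int) c = c + (c2 k : Int) := by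
  induction k using Nat.strong_induction_on generalizing c with
  | _ k ih =>
    rw [countTwosInner, c2]
    by_cases hk : k = 0
    · subst hk; simp
    · have hkpos : 0 < (k : Int) := by omega
      have htd : (k : Int).tdiv 10 = ((k / 10 : Nat) : Int) := by
        rw [Int.tdiv_eq_ediv_of_nonneg (by omega)]
        omega
      have hem : Int.emod (k : Int) 10 = ((k % 10 : Nat) : Int) := (Int.natCast_mod k 10).symm
      rw [dif_pos hkpos, htd, hem, ih (k / 10) (by omega)]
      simp only [hk, if_false]
      by_cases h2 : k % 10 = 2
      · rw [if_pos h2, if_pos (by exact_mod_cast congrArg (Nat.cast : Nat → Int) h2)]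
        push_cast; ring
      · rw [if_neg h2, if_neg (by omega)]
        push_cast; ring

lemma foldl_inner_eq (N : Nat) (c : Int) :
    (List.map (fun k : Nat => (0 : Int) + (k : Int)) (List.range N)).foldl
        (fun count m => countTwosInner m count) c = c + (sumC2 N : Int) := by
  induction N generalizing c with
  | zero => simp [sumC2]
  | succ N ih =>
    rw [List.range_succ, List.map_append, List.foldl_append, ih]
    simp only [List.map_cons, List.map_nil, List.foldl_cons, List.foldl_nil]
    have h := countTwosInner_eq N (c + (sumC2 N : Int))
    rw [zero_add, h, sumC2, sumC2, Finset.sum_range_succ]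
    push_cast; ring

lemma countTwos_val (n : Int) : countTwos n = (sumC2 (n + 1).toNat : Int) := by
  rw [countTwos, PySem.List.pyRange_one, sub_zero, foldl_inner_eq, zero_add]

-- indicator sum over an initial segment
lemma sum_indicator_Ico (a b M : Nat) :
    ∑ m ∈ Finset.range M, (if a ≤ m ∧ m < b then 1 else 0) = min b M - min a M := by
  induction M with
  | zero => simp
  | succ M ih =>
    rw [Finset.sum_range_succ, ih]
    split_ifs with h <;> omega

-- characterisation of "digit at position p is 2"
lemma digit_two_iff (p m : Nat) (hp : 0 < p) :
    (m / p % 10 = 2) ↔ (2 * p ≤ m % (p * 10) ∧ m % (p * 10) < 3 * p) := by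
  rw [← Nat.mod_mul_right_div_self m p 10]
  generalize m % (p * 10) = r
  constructor
  · intro h
    exact ⟨(Nat.le_div_iff_mul_le hp).1 (by omega),
           (Nat.div_lt_iff_lt_mul hp).1 (by omega)⟩
  · rintro ⟨h1, h2⟩
    have a := (Nat.le_div_iff_mul_le hp).2 h1
    have b := (Nat.div_lt_iff_lt_mul hp).2 h2
    omega

-- pointwise periodicity of the position-p digit
lemma digit_periodic (p m : Nat) (hp : 0 < p) :
    (p * 10 + m) / p % 10 = m / p % 10 := by
  rw [Nat.add_comm (p * 10) m, Nat.add_mul_div_left m 10 hp]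
  omega

-- sum of the indicator over one full period
lemma one_period_sum (p : Nat) (hp : 0 < p) :
    ∑ m ∈ Finset.range (p * 10), (if m / p % 10 = 2 then 1 else 0) = p := by
  have hcongr : ∀ m ∈ Finset.range (p * 10),
      (if m / p % 10 = 2 then (1 : Nat) else 0) = (if 2 * p ≤ m ∧ m < 3 * p then 1 else 0) := by
    intro m hm
    rw [Finset.mem_range] at hm
    have h := digit_two_iff p m hp
    rw [Nat.mod_eq_of_lt hm] at h
    simp only [h]
  rw [Finset.sum_congr rfl hcongr, sum_indicator_Ico]
  omega

-- full periods plus remainder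
lemma full_periods (p : Nat) (hp : 0 < p) (q : Nat) : ∀ s : Nat,
    ∑ m ∈ Finset.range (q * (p * 10) + s), (if m / p % 10 = 2 then 1 else 0)
      = q * p + ∑ m ∈ Finset.range s, (if m / p % 10 = 2 then 1 else 0) := by
  induction q with
  | zero => simp
  | succ q ih =>
    intro s
    have hsplit : (q + 1) * (p * 10) + s = q * (p * 10) + (p * 10 + s) := by ring
    rw [hsplit, ih (p * 10 + s), Finset.sum_range_add]
    have hpt : ∀ m, (if (p * 10 + m) / p % 10 = 2 then (1 : Nat) else 0)
        = (if m / p % 10 = 2 then 1 else 0) := by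
      intro m; rw [digit_periodic p m hp]
    simp only [hpt]
    rw [one_period_sum p hp]
    ring

-- the per-position counting formula
lemma cnt_formula (N p : Nat) (hp : 0 < p) :
    ∑ m ∈ Finset.range (N + 1), (if m / p % 10 = 2 then 1 else 0)
      = (if (N / p) % 10 < 2 then N / (p * 10) * p
         else if (N / p) % 10 = 2 then N / (p * 10) * p + N % p + 1
         else (N / (p * 10) + 1) * p) := by
  have hT : 0 < p * 10 := by omega
  obtain ⟨H, r, hN, hrlt⟩ : ∃ H r, r + (p * 10) * H = N ∧ r < p * 10 :=
    ⟨N / (p * 10), N % (p * 10), Nat.mod_add_div N (p * 10), Nat.mod_lt _ hT⟩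
  obtain ⟨hHdiv, hrmod⟩ : N / (p * 10) = H ∧ N % (p * 10) = r :=
    (Nat.div_mod_unique hT).2 ⟨hN, hrlt⟩
  obtain ⟨cur, lower, hr, hlowlt⟩ : ∃ cur lower, lower + p * cur = r ∧ lower < p :=
    ⟨r / p, r % p, Nat.mod_add_div r p, Nat.mod_lt _ hp⟩
  obtain ⟨hcurdiv, hlowmod⟩ : r / p = cur ∧ r % p = lower :=
    (Nat.div_mod_unique hp).2 ⟨hr, hlowlt⟩
  have hcur10 : cur < 10 := by
    have h := (Nat.div_lt_iff_lt_mul hp).2 (show r < 10 * p by omega)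
    omega
  have hcurN : N / p % 10 = cur := by
    rw [← Nat.mod_mul_right_div_self, hrmod, hcurdiv]
  have hlowN : N % p = lower := by
    rw [← Nat.mod_mod_of_dvd N ⟨10, rfl⟩, hrmod, hlowmod]
  rw [hcurN, hlowN, hHdiv]
  by_cases hfull : r + 1 = p * 10
  · -- N + 1 is a multiple of the period
    have hc9 : cur = 9 := by
      have h9 : 9 ≤ r / p := (Nat.le_div_iff_mul_le hp).2 (by omega)
      omega
    have h1 : N + 1 = (H + 1) * (p * 10) + 0 := by
      have e : (H + 1) * (p * 10) = p * 10 + (p * 10) * H := by ring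
      omega
    rw [h1, full_periods p hp (H + 1) 0, hc9]
    have e2 : (H + 1) * p = H * p + p := by ring
    simp only [Finset.sum_range_zero]
    norm_num
  · -- partial last period of length r + 1
    have h1 : N + 1 = H * (p * 10) + (r + 1) := by
      have e : H * (p * 10) = (p * 10) * H := by ring
      omega
    rw [h1, full_periods p hp H (r + 1)]
    have hcongr : ∀ m ∈ Finset.range (r + 1),
        (if m / p % 10 = 2 then (1 : Nat) else 0) = (if 2 * p ≤ m ∧ m < 3 * p then 1 else 0) := by
      intro m hm
      rw [Finset.mem_range] at hm
      have h := digit_two_iff p m hp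
      rw [Nat.mod_eq_of_lt (by omega : m < p * 10)] at h
      simp only [h]
    rw [Finset.sum_congr rfl hcongr, sum_indicator_Ico]
    have e2 : (H + 1) * p = H * p + p := by ring
    interval_cases cur <;> split_ifs <;> omega

-- one digit of c2, split off at position p
lemma c2_split (m p : Nat) :
    c2 (m / p) = (if m / p % 10 = 2 then 1 else 0) + c2 (m / (p * 10)) := by
  rw [← Nat.div_div_eq_div_mul]
  by_cases h : m / p = 0
  · rw [h]; simp [c2]
  · conv_lhs => rw [c2, if_neg h]

-- invariant of B's loop, by induction on how far p still is from passing n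
lemma countTwosAltGo_eq (N : Nat) : ∀ fuel p, N + 1 - p ≤ fuel → 0 < p → ∀ c,
    countTwosAltGo N p c = c + ∑ m ∈ Finset.range (N + 1), c2 (m / p) := by
  intro fuel
  induction fuel with
  | zero =>
    intro p hf hp c
    rw [countTwosAltGo, if_neg (by omega), if_neg (by omega)]
    have hz : ∀ m ∈ Finset.range (N + 1), c2 (m / p) = 0 := by
      intro m hm
      rw [Finset.mem_range] at hm
      rw [Nat.div_eq_of_lt (by omega)]
      simp [c2]
    rw [Finset.sum_congr rfl hz]
    simp
  | succ fuel ih =>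
    intro p hf hp c
    by_cases hpn : p ≤ N
    · rw [countTwosAltGo, if_neg (by omega), if_pos hpn]
      simp only []
      rw [ih (p * 10) (by omega) (by omega)]
      have hsum : ∑ m ∈ Finset.range (N + 1), c2 (m / p)
          = (∑ m ∈ Finset.range (N + 1), (if m / p % 10 = 2 then 1 else 0))
            + ∑ m ∈ Finset.range (N + 1), c2 (m / (p * 10)) := by
        rw [← Finset.sum_add_distrib]
        exact Finset.sum_congr rfl (fun m _ => c2_split m p)
      rw [hsum, cnt_formula N p hp]
      split_ifs <;> ring
    · rw [countTwosAltGo, if_neg (by omega), if_neg hpn]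
      have hz : ∀ m ∈ Finset.range (N + 1), c2 (m / p) = 0 := by
        intro m hm
        rw [Finset.mem_range] at hm
        rw [Nat.div_eq_of_lt (by omega)]
        simp [c2]
      rw [Finset.sum_congr rfl hz]
      simp

lemma countTwos_alt_val (n : Int) : countTwos_alt n = (sumC2 (n + 1).toNat : Int) := by
  rw [countTwos_alt]
  by_cases hn : n < 0
  · rw [if_pos hn]
    have h0 : (n + 1).toNat = 0 := by omega
    rw [h0]; simp [sumC2]
  · rw [if_neg hn, countTwosAltGo_eq n.toNat (n.toNat + 1) 1 (by omega) (by omega) 0]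
    have h1 : (n + 1).toNat = n.toNat + 1 := by omega
    rw [h1, sumC2]
    simp [Nat.div_one]

-- ===== VERDICT (by name: the statement is the Claim_ definition above) =====
theorem countTwos_spec : Claim_equal_countTwos := by
  intro n _
  unfold Spec_countTwos
  rw [countTwos_val, countTwos_alt_val]
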